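-- pv_equiv track=rewrite | github.com/quantumx-apps/filebrowserDocs | scripts/update-publish-dates.py | insert_date_fields
-- ===== SOURCE A (Python) =====
-- def insert_date_fields(fm_lines: list[str], date_val: str, lastmod_val: str) -> list[str]:
--     without_dates: list[str] = []
--     for ln in fm_lines:
--         st = ln.strip()
--         if st.startswith("date:") or st.startswith("lastmod:"):
--             continue
--         without_dates.append(ln)
--
--     date_line = f'date: "{date_val}"\n'
--     lastmod_line = f'lastmod: "{lastmod_val}"\n'
--
--     def find_insert_index(lines_list: list[str]) -> int:
--         for i, ln in enumerate(lines_list):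
--             if ln.strip().startswith("icon:"):
--                 return i + 1
--         for i, ln in enumerate(lines_list):
--             if ln.strip().startswith("description:"):
--                 return i + 1
--         for i, ln in enumerate(lines_list):
--             if ln.strip().startswith("title:"):
--                 return i + 1
--         return 0
--
--     idx = find_insert_index(without_dates)
--     # Insert after idx line; keep a single trailing newline style
--     out = without_dates[:idx] + [date_line, lastmod_line] + without_dates[idx:]
--     return out
-- ===== SOURCE B (Python) =====
-- def insert_date_fields(fm_lines: list[str], date_val: str, lastmod_val: str) -> list[str]:
--     without_dates = [ln for ln in fm_lines
--                      if not ln.strip().startswith(("date:", "lastmod:"))]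
--
--     # one pass: record the first index of each priority key
--     icon_i = desc_i = title_i = None
--     for i, ln in enumerate(without_dates):
--         st = ln.strip()
--         if icon_i is None and st.startswith("icon:"):
--             icon_i = i
--         if desc_i is None and st.startswith("description:"):
--             desc_i = i
--         if title_i is None and st.startswith("title:"):
--             title_i = i
--
--     if icon_i is not None:
--         idx = icon_i + 1
--     elif desc_i is not None:
--         idx = desc_i + 1
--     elif title_i is not None:
--         idx = title_i + 1
--     else:
--         idx = 0
--
--     return (without_dates[:idx]
--             + [f'date: "{date_val}"\n', f'lastmod: "{lastmod_val}"\n']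
--             + without_dates[idx:])
-- ===== Notes on version B (the rewrite author's own statement) =====
-- stated objective: alternative
-- what changed: The three sequential priority scans of find_insert_index are replaced by a single pass over the filtered lines that records the first index of each of icon:/description:/title:, followed by a priority selection; the filtering loop becomes a comprehension. (fewer passes over the list: one scan instead of up to three)
import Mathlib
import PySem

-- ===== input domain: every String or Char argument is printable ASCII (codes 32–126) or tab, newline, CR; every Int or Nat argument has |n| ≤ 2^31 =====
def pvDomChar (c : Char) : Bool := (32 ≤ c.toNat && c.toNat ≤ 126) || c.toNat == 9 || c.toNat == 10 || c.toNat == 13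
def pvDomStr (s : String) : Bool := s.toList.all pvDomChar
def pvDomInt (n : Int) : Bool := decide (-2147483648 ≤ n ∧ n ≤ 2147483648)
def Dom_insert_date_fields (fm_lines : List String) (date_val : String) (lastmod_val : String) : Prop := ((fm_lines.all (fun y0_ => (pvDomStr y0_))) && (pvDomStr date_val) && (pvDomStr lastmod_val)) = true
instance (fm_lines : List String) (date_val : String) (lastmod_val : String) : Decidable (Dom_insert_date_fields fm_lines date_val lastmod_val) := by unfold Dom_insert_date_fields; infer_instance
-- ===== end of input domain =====

-- B changes the decomposition: the three sequential priority scans of A are replaced by one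
-- pass that records the first index of each key, then selects by priority (objective: alternative).

-- ===== PORT A =====
-- the three sequential early-return scans of find_insert_index, one scan each
def pvScanA : List String → String → Nat → Option Nat
  | [], _, _ => none
  | ln :: rest, p, i =>
    if PySem.Str.startswith (PySem.Str.strip ln) p then some (i + 1)
    else pvScanA rest p (i + 1)

def pvFindInsertIndex (lines_list : List String) : Nat :=
  match pvScanA lines_list "icon:" 0 with
  | some j => j
  | none =>
    match pvScanA lines_list "description:" 0 with
    | some j => j
    | none =>
      match pvScanA lines_list "title:" 0 with
      | some j => j
      | none => 0

def insert_date_fields (fm_lines : List String) (date_val : String) (lastmod_val : String) : List String :=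
  let without_dates := fm_lines.foldl (fun acc ln =>
    let st := PySem.Str.strip ln
    if PySem.Str.startswith st "date:" || PySem.Str.startswith st "lastmod:" then acc
    else acc ++ [ln]) []
  let date_line := "date: \"" ++ date_val ++ "\"\n"
  let lastmod_line := "lastmod: \"" ++ lastmod_val ++ "\"\n"
  let idx := pvFindInsertIndex without_dates
  PySem.List.slice without_dates none (some (idx : Int)) ++ [date_line, lastmod_line] ++
    PySem.List.slice without_dates (some (idx : Int)) none

-- ===== PORT B =====
-- one pass over the filtered lines recording first occurrence of each key
def pvPassB : List String → Nat → Option Nat × Option Nat × Option Nat → Option Nat × Option Nat × Option Nat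
  | [], _, s => s
  | ln :: rest, i, (ic, de, ti) =>
    let st := PySem.Str.strip ln
    let ic := if ic.isNone && PySem.Str.startswith st "icon:" then some i else ic
    let de := if de.isNone && PySem.Str.startswith st "description:" then some i else de
    let ti := if ti.isNone && PySem.Str.startswith st "title:" then some i else ti
    pvPassB rest (i + 1) (ic, de, ti)

def insert_date_fields_alt (fm_lines : List String) (date_val : String) (lastmod_val : String) : List String :=
  let without_dates := fm_lines.filter (fun ln =>
    !(PySem.Str.startswith (PySem.Str.strip ln) "date:" ||
      PySem.Str.startswith (PySem.Str.strip ln) "lastmod:"))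
  let firsts := pvPassB without_dates 0 (none, none, none)
  let idx : Nat :=
    match firsts.1 with
    | some j => j + 1
    | none =>
      match firsts.2.1 with
      | some j => j + 1
      | none =>
        match firsts.2.2 with
        | some j => j + 1
        | none => 0
  PySem.List.slice without_dates none (some (idx : Int)) ++
    ["date: \"" ++ date_val ++ "\"\n", "lastmod: \"" ++ lastmod_val ++ "\"\n"] ++
    PySem.List.slice without_dates (some (idx : Int)) none

-- ===== PRECONDITION & SPEC =====
def Spec_insert_date_fields (fm_lines : List String) (date_val : String) (lastmod_val : String) (out : List String) : Prop := out = insert_date_fields_alt fm_lines date_val lastmod_val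
instance (fm_lines : List String) (date_val : String) (lastmod_val : String) (out : List String) : Decidable (Spec_insert_date_fields fm_lines date_val lastmod_val out) := by unfold Spec_insert_date_fields; infer_instance

-- ===== CLAIM (what is proved, stated in full; the proofs are below) =====
def Claim_equal_insert_date_fields : Prop := ∀ (fm_lines : List String) (date_val : String) (lastmod_val : String), Dom_insert_date_fields fm_lines date_val lastmod_val → Spec_insert_date_fields fm_lines date_val lastmod_val (insert_date_fields fm_lines date_val lastmod_val)

-- ===== LEMMAS AND PROOFS =====

theorem pv_foldl_filter (xs : List String) (P : String → Bool) (acc : List String) :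
    xs.foldl (fun acc ln => if P ln then acc else acc ++ [ln]) acc
      = acc ++ xs.filter (fun ln => !P ln) := by
  induction xs generalizing acc with
  | nil => simp
  | cons x xs ih =>
    simp only [List.foldl_cons, List.filter_cons]
    by_cases h : P x <;> simp [h, ih]

theorem pvScanA_eq (xs : List String) (p : String) (i : Nat) :
    pvScanA xs p i
      = (xs.findIdx? (fun ln => PySem.Str.startswith (PySem.Str.strip ln) p)).map (fun j => i + j + 1) := by
  induction xs generalizing i with
  | nil => simp [pvScanA]
  | cons x xs ih =>
    simp only [pvScanA, List.findIdx?_cons]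
    split_ifs with h
    · simp
    · rw [ih]
      cases xs.findIdx? (fun ln => PySem.Str.startswith (PySem.Str.strip ln) p) <;> simp <;> omega

theorem pvPassB_fst (xs : List String) (i : Nat) (s : Option Nat × Option Nat × Option Nat) :
    (pvPassB xs i s).1
      = s.1.or ((xs.findIdx? (fun ln => PySem.Str.startswith (PySem.Str.strip ln) "icon:")).map (fun j => i + j)) := by
  induction xs generalizing i s with
  | nil => simp [pvPassB]
  | cons x xs ih =>
    obtain ⟨ic, de, ti⟩ := s
    simp only [pvPassB, ih, List.findIdx?_cons]
    cases ic with
    | some a => simp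
    | none =>
      simp only [Option.isNone_none, Bool.true_and, Option.or]
      split_ifs with h
      · simp
      · cases xs.findIdx? (fun ln => PySem.Str.startswith (PySem.Str.strip ln) "icon:") <;> simp <;> omega

theorem pvPassB_snd (xs : List String) (i : Nat) (s : Option Nat × Option Nat × Option Nat) :
    (pvPassB xs i s).2.1
      = s.2.1.or ((xs.findIdx? (fun ln => PySem.Str.startswith (PySem.Str.strip ln) "description:")).map (fun j => i + j)) := by
  induction xs generalizing i s with
  | nil => simp [pvPassB]
  | cons x xs ih =>
    obtain ⟨ic, de, ti⟩ := s
    simp only [pvPassB, ih, List.findIdx?_cons]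
    cases de with
    | some a => simp
    | none =>
      simp only [Option.isNone_none, Bool.true_and, Option.or]
      split_ifs with h
      · simp
      · cases xs.findIdx? (fun ln => PySem.Str.startswith (PySem.Str.strip ln) "description:") <;> simp <;> omega

theorem pvPassB_trd (xs : List String) (i : Nat) (s : Option Nat × Option Nat × Option Nat) :
    (pvPassB xs i s).2.2
      = s.2.2.or ((xs.findIdx? (fun ln => PySem.Str.startswith (PySem.Str.strip ln) "title:")).map (fun j => i + j)) := by
  induction xs generalizing i s with
  | nil => simp [pvPassB]
  | cons x xs ih =>
    obtain ⟨ic, de, ti⟩ := s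
    simp only [pvPassB, ih, List.findIdx?_cons]
    cases ti with
    | some a => simp
    | none =>
      simp only [Option.isNone_none, Bool.true_and, Option.or]
      split_ifs with h
      · simp
      · cases xs.findIdx? (fun ln => PySem.Str.startswith (PySem.Str.strip ln) "title:") <;> simp <;> omega

theorem insert_date_fields_spec : Claim_equal_insert_date_fields := by
  intro fm_lines date_val lastmod_val _
  unfold Spec_insert_date_fields insert_date_fields insert_date_fields_alt
  have hfold := pv_foldl_filter fm_lines
    (fun ln => PySem.Str.startswith (PySem.Str.strip ln) "date:" ||
               PySem.Str.startswith (PySem.Str.strip ln) "lastmod:") []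
  simp only [List.nil_append] at hfold
  rw [show (fun (acc : List String) (ln : String) =>
        let st := PySem.Str.strip ln
        if PySem.Str.startswith st "date:" || PySem.Str.startswith st "lastmod:" then acc
        else acc ++ [ln])
      = (fun acc ln =>
        if PySem.Str.startswith (PySem.Str.strip ln) "date:" ||
           PySem.Str.startswith (PySem.Str.strip ln) "lastmod:" then acc
        else acc ++ [ln]) from rfl, hfold]
  set wd := fm_lines.filter (fun ln =>
    !(PySem.Str.startswith (PySem.Str.strip ln) "date:" ||
      PySem.Str.startswith (PySem.Str.strip ln) "lastmod:")) with hwd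
  have hidx : pvFindInsertIndex wd =
      (match (pvPassB wd 0 (none, none, none)).1 with
       | some j => j + 1
       | none =>
         match (pvPassB wd 0 (none, none, none)).2.1 with
         | some j => j + 1
         | none =>
           match (pvPassB wd 0 (none, none, none)).2.2 with
           | some j => j + 1
           | none => 0) := by
    unfold pvFindInsertIndex
    rw [pvScanA_eq, pvScanA_eq, pvScanA_eq, pvPassB_fst, pvPassB_snd, pvPassB_trd]
    cases wd.findIdx? (fun ln => PySem.Str.startswith (PySem.Str.strip ln) "icon:") <;>
    cases wd.findIdx? (fun ln => PySem.Str.startswith (PySem.Str.strip ln) "description:") <;>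
    cases wd.findIdx? (fun ln => PySem.Str.startswith (PySem.Str.strip ln) "title:") <;>
      simp [Option.or]
  simp only [hidx]
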